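-- pv_equiv track=rewrite | github.com/abolfazlmalekahmadi/Rosalind_problems | Multiple Alignment.py | _calc_candidate_indices
-- ===== SOURCE A (Python) =====
-- from itertools import product, combinations
--
-- def _calc_candidate_indices(index):
--     mask = tuple(1 if x != 0 else 0 for x in index)
--     cand_idxs_subs = list(product((0, 1), repeat=len(index)))[1:]
--     cand_idxs_subs = [x for x in cand_idxs_subs if _feasible_cand(x, mask)]
--
--     cand_idxs = []
--     for cand_idxs_sub in cand_idxs_subs:
--         cand_idxs.append(tuple(x - y for x, y in zip(index, cand_idxs_sub)))
--     return cand_idxs, cand_idxs_subs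
--
-- def _feasible_cand(idx_sub, mask):
--     return all(True if s == 0 else m == 1 for s, m in zip(idx_sub, mask))
-- ===== SOURCE B (Python) =====
-- def _calc_candidate_indices(index):
--     # Recursive subset generation: zero coordinates contribute a single branch (bit 0),
--     # nonzero coordinates branch into 0 then 1, yielding the same lexicographic order
--     # as A's full 2^n product-then-filter, in O(2^k * n) for k nonzero coordinates.
--     def gen(rest):
--         if not rest:
--             return [()]
--         tails = gen(rest[1:])
--         if rest[0] == 0:
--             return [(0,) + t for t in tails]
--         return [(0,) + t for t in tails] + [(1,) + t for t in tails]
--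
--     subs = gen(index)[1:]
--     cands = [tuple(a - b for a, b in zip(index, s)) for s in subs]
--     return cands, subs
-- ===== Notes on version B (the rewrite author's own statement) =====
-- stated objective: faster
-- what changed: Replaces A's enumeration of all 2^n binary tuples followed by a feasibility filter with a recursive generator over the index that branches only at nonzero coordinates, producing exactly the feasible tuples in the same lexicographic order.
import Mathlib
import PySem

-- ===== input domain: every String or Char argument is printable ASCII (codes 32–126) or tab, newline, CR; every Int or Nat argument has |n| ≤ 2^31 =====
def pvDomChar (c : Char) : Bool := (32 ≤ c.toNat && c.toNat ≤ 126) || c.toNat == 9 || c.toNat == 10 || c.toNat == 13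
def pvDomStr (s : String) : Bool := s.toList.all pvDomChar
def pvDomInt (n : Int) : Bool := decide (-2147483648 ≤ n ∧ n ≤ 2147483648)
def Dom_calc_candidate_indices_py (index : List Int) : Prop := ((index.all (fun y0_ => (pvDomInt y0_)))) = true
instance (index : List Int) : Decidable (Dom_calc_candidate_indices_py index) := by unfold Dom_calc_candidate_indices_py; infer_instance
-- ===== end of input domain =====

-- B replaces the full 2^n product + feasibility filter by a recursion over the index that
-- branches only at nonzero coordinates (objective: faster, output-sensitive enumeration).


-- ===== PORT A =====
-- list(product((0, 1), repeat=n)): all 0/1 lists of length n, first coordinate varying slowest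
def pvProd01 : Nat → List (List Int)
  | 0 => [[]]
  | n + 1 => (pvProd01 n).map (fun r => 0 :: r) ++ (pvProd01 n).map (fun r => 1 :: r)

-- _feasible_cand(idx_sub, mask)
def pvFeasibleCand (idx_sub mask : List Int) : Bool :=
  (idx_sub.zip mask).all (fun p => if p.1 = 0 then true else p.2 == 1)

def calc_candidate_indices_py (index : List Int) : List (List Int) × List (List Int) :=
  let mask : List Int := index.map (fun x => if x ≠ 0 then 1 else 0)
  let cand_idxs_subs0 := (pvProd01 index.length).drop 1
  let cand_idxs_subs := cand_idxs_subs0.filter (fun x => pvFeasibleCand x mask)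
  let cand_idxs := cand_idxs_subs.foldl
    (fun acc sub => acc ++ [List.zipWith (fun x y => x - y) index sub]) []
  (cand_idxs, cand_idxs_subs)

-- ===== PORT B =====
-- gen(rest): recursive subset generation, branching only at nonzero coordinates
def pvGen : List Int → List (List Int)
  | [] => [[]]
  | x :: rest =>
    let tails := pvGen rest
    if x = 0 then tails.map (fun t => 0 :: t)
    else tails.map (fun t => 0 :: t) ++ tails.map (fun t => 1 :: t)

def calc_candidate_indices_py_alt (index : List Int) : List (List Int) × List (List Int) :=
  let subs := (pvGen index).drop 1
  let cands := subs.map (fun s => List.zipWith (fun a b => a - b) index s)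
  (cands, subs)

-- ===== PRECONDITION & SPEC =====
def Spec_calc_candidate_indices_py (index : List Int) (out : List (List Int) × List (List Int)) : Prop := out = calc_candidate_indices_py_alt index
instance (index : List Int) (out : List (List Int) × List (List Int)) : Decidable (Spec_calc_candidate_indices_py index out) := by unfold Spec_calc_candidate_indices_py; infer_instance

-- ===== CLAIM (what is proved, stated in full; the proofs are below) =====
def Claim_equal_calc_candidate_indices_py : Prop := ∀ (index : List Int), Dom_calc_candidate_indices_py index → Spec_calc_candidate_indices_py index (calc_candidate_indices_py index)

-- ===== LEMMAS AND PROOFS =====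

-- the all-zero tuple is feasible under any mask
theorem pvFeasible_replicate (n : Nat) (m : List Int) :
    pvFeasibleCand (List.replicate n 0) m = true := by
  induction n generalizing m with
  | zero => simp [pvFeasibleCand]
  | succ k ih =>
    cases m with
    | nil => simp [pvFeasibleCand]
    | cons a t =>
      simp only [List.replicate, pvFeasibleCand, List.zip_cons_cons, List.all_cons]
      exact ih t

-- pvProd01 starts with the all-zero tuple
theorem pvProd01_head (n : Nat) :
    ∃ t, pvProd01 n = List.replicate n 0 :: t := by
  induction n with
  | zero => exact ⟨[], rfl⟩
  | succ k ih =>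
    obtain ⟨t, ht⟩ := ih
    exact ⟨t.map (fun r => 0 :: r) ++ (pvProd01 k).map (fun r => 1 :: r),
      by simp [pvProd01, ht, List.replicate]⟩

-- filtering the full product by feasibility gives exactly B's generator
theorem pvFilter_prod_eq_gen (index : List Int) :
    (pvProd01 index.length).filter
      (fun x => pvFeasibleCand x (index.map (fun y => if y ≠ 0 then 1 else 0))) = pvGen index := by
  induction index with
  | nil => simp [pvProd01, pvGen, pvFeasibleCand]
  | cons x rest ih =>
    show ((pvProd01 rest.length).map (fun r => 0 :: r)
        ++ (pvProd01 rest.length).map (fun r => 1 :: r)).filter _ = pvGen (x :: rest)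
    rw [List.filter_append, List.filter_map, List.filter_map]
    have h0 : ((fun s => pvFeasibleCand s ((x :: rest).map (fun y => if y ≠ 0 then 1 else 0)))
          ∘ (fun r => (0 : Int) :: r))
        = fun s => pvFeasibleCand s (rest.map (fun y => if y ≠ 0 then 1 else 0)) := by
      funext s; simp [Function.comp, pvFeasibleCand]
    by_cases hx : x = 0
    · have h1 : ((pvProd01 rest.length).filter
          ((fun s => pvFeasibleCand s ((x :: rest).map (fun y => if y ≠ 0 then 1 else 0)))
            ∘ (fun r => (1 : Int) :: r))) = [] := by
        apply List.filter_eq_nil_iff.mpr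
        intro a _
        simp [Function.comp, pvFeasibleCand, hx]
      rw [h1, h0, ih]
      simp [pvGen, hx]
    · have h1 : ((fun s => pvFeasibleCand s ((x :: rest).map (fun y => if y ≠ 0 then 1 else 0)))
            ∘ (fun r => (1 : Int) :: r))
          = fun s => pvFeasibleCand s (rest.map (fun y => if y ≠ 0 then 1 else 0)) := by
        funext s; simp [Function.comp, pvFeasibleCand, hx]
      rw [h0, h1, ih]
      simp [pvGen, hx]

-- A's append-loop over subs is a map
theorem pvFoldl_append_map (index : List Int) (l : List (List Int)) (acc : List (List Int)) :
    l.foldl (fun acc sub => acc ++ [List.zipWith (fun x y => x - y) index sub]) acc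
      = acc ++ l.map (fun s => List.zipWith (fun a b => a - b) index s) := by
  induction l generalizing acc with
  | nil => simp
  | cons h t ih => simp [List.foldl_cons, ih]

theorem pvSubs_eq (index : List Int) :
    ((pvProd01 index.length).drop 1).filter
      (fun x => pvFeasibleCand x (index.map (fun y => if y ≠ 0 then 1 else 0)))
      = (pvGen index).drop 1 := by
  obtain ⟨t, ht⟩ := pvProd01_head index.length
  rw [← pvFilter_prod_eq_gen, ht]
  simp [pvFeasible_replicate]

-- ===== VERDICT (by name: the statement is the Claim_ definition above) =====
theorem calc_candidate_indices_py_spec : Claim_equal_calc_candidate_indices_py := by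
  intro index _
  unfold Spec_calc_candidate_indices_py calc_candidate_indices_py calc_candidate_indices_py_alt
  simp only [pvSubs_eq, pvFoldl_append_map, List.nil_append]
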